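-- pv_equiv track=rewrite | github.com/Wahid7852/aoc25 | day3.py | overclock_joltage
-- ===== SOURCE A (Python) =====
-- def overclock_joltage(bank: str) -> int:
--     def inner(start_idx: int, remaining: int) -> int:
--         largest = 0
--         largest_idx = 0
--         for i in range(start_idx, len(bank) - remaining + 1):
--             v = int(bank[i])
--             if v > largest:
--                 largest = v
--                 largest_idx = i
--         if remaining > 1:
--             return largest * 10**(remaining -1) + inner(largest_idx + 1, remaining - 1)
--         else:
--             return largest
--     return inner(0, 12)
-- ===== SOURCE B (Python) =====
-- def overclock_joltage(bank: str) -> int: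
--     n = len(bank)
--     result = 0
--     start = 0
--     for remaining in range(12, 0, -1):
--         largest = 0
--         largest_idx = 0
--         for i in range(start, n - remaining + 1):
--             v = int(bank[i])
--             if v > largest:
--                 largest = v
--                 largest_idx = i
--         result = result * 10 + largest
--         start = largest_idx + 1
--     return result
-- ===== Notes on version B (the rewrite author's own statement) =====
-- stated objective: simpler
-- what changed: Replaced the nested recursive helper (recursion on the countdown counter with 10**k place values) by a single iterative 12-step loop with a result accumulator multiplied by 10 each step.
import Mathlib
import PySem

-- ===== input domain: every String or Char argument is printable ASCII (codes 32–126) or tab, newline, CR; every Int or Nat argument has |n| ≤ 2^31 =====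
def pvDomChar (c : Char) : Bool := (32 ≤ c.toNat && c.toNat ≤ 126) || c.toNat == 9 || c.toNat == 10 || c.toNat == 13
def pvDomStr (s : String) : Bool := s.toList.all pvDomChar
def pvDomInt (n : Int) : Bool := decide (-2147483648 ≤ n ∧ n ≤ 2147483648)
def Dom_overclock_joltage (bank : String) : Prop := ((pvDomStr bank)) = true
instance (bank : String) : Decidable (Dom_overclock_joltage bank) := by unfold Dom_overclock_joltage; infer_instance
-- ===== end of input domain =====

-- ===== PORT A =====
-- B rewrites A's recursion as one iterative accumulator loop (objective: simpler decomposition).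
-- Pre_ excludes strings containing a non-digit character, on which Python's int(bank[i]) raises ValueError.

-- shared inner scan, a transliteration of the identical inner for-loop both Pythons contain:
-- fold (largest, largest_idx) over range(start, bound), v = int(bank[i]), strict '>' update
def pvDigit (bank : String) (i : Int) : Int :=
  match PySem.Str.pyGet? bank i with
  | some c => (PySem.Int.ofStr? (String.singleton c)).getD 0   -- int(bank[i]); Pre_ keeps it a digit
  | none => 0

def pvScan (bank : String) (start bound : Int) : Int × Int :=
  (PySem.List.pyRange start bound 1).foldl
    (fun (st : Int × Int) i =>
      let v := pvDigit bank i
      if v > st.1 then (v, i) else st) (0, 0)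

-- inner(start_idx, remaining); remaining is the Nat recursion fuel (Python counts it down from 12 to 1)
def pvInner (bank : String) : Nat → Int → Int
  | 0, _ => 0
  | r + 1, start_idx =>
    let p := pvScan bank start_idx ((bank.toList.length : Int) - ((r : Int) + 1) + 1)
    if r + 1 > 1 then p.1 * 10 ^ r + pvInner bank r (p.2 + 1)
    else p.1

def overclock_joltage (bank : String) : Int := pvInner bank 12 0

-- ===== PORT B =====
def overclock_joltage_alt (bank : String) : Int :=
  let n : Int := bank.toList.length
  ((PySem.List.pyRange 12 0 (-1)).foldl
    (fun (st : Int × Int) remaining =>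
      let p := pvScan bank st.2 (n - remaining + 1)
      (st.1 * 10 + p.1, p.2 + 1)) (0, 0)).1

-- ===== PRECONDITION & SPEC =====
-- Pre_: exactly the strings on which Python's int(bank[i]) never raises a ValueError: every accessed
-- character must be an ASCII digit — all of them when len ≥ 12, and all but the first when len < 12
-- (with fewer than 12 characters the leading scans are empty, largest_idx stays 0, start becomes 1,
-- so index 0 is never read).
def Pre_overclock_joltage (bank : String) : Prop :=
  ((if bank.toList.length ≥ 12 then bank.toList else bank.toList.drop 1).all Char.isDigit) = true
instance (bank : String) : Decidable (Pre_overclock_joltage bank) := by unfold Pre_overclock_joltage; infer_instance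
def pvWitness_overclock_joltage : String := "987654321098"
def Spec_overclock_joltage (bank : String) (out : Int) : Prop := out = overclock_joltage_alt bank
instance (bank : String) (out : Int) : Decidable (Spec_overclock_joltage bank out) := by unfold Spec_overclock_joltage; infer_instance

-- ===== CLAIM (what is proved, stated in full; the proofs are below) =====
def Claim_equal_overclock_joltage : Prop := ∀ (bank : String), Dom_overclock_joltage bank → Pre_overclock_joltage bank → Spec_overclock_joltage bank (overclock_joltage bank)

-- ===== LEMMAS AND PROOFS =====

-- the countdown list [r, r-1, ..., 1] as Ints
def pvDown : Nat → List Int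
  | 0 => []
  | r + 1 => ((r : Int) + 1) :: pvDown r

lemma pvRange_down : PySem.List.pyRange 12 0 (-1) = pvDown 12 := by decide

lemma pvFold_eq_inner (bank : String) (r : Nat) :
    ∀ (acc start : Int),
      ((pvDown r).foldl
        (fun (st : Int × Int) remaining =>
          let p := pvScan bank st.2 ((bank.toList.length : Int) - remaining + 1)
          (st.1 * 10 + p.1, p.2 + 1)) (acc, start)).1
      = acc * 10 ^ r + pvInner bank r start := by
  induction r with
  | zero => intro acc start; simp [pvDown, pvInner]
  | succ r ih =>
    intro acc start
    simp only [pvDown, List.foldl_cons, ih]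
    cases r with
    | zero => simp [pvInner]
    | succ r' =>
      simp only [pvInner]
      push_cast
      have h : r' + 1 + 1 > 1 := by omega
      simp only [if_pos h]
      ring

-- ===== VERDICT (by name: the statement is the Claim_ definition above) =====
theorem overclock_joltage_spec : Claim_equal_overclock_joltage := by
  intro bank _ _
  unfold Spec_overclock_joltage overclock_joltage overclock_joltage_alt
  rw [pvRange_down, pvFold_eq_inner bank 12 0 0]
  ring
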